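-- pv_equiv track=rewrite | github.com/1984bot/simpleGematria | gematria_methods_module.py | getOrdinalGematria
-- ===== SOURCE A (Python) =====
-- def hasNumbers(phrase):
--     return any(char.isdigit() for char in phrase)
--
-- def getOrdinalGematria(phrase):
--     total = 0
--
--     # First check to see if the phrase contains any numbers
--     if hasNumbers(phrase):
--         pass
--     else:
--
--         stripped_phrase = phrase.replace(" ", "") #replaces all spaces with nothing
--         for c in stripped_phrase:
--             ordinal = ord(c) - 96
--             total += ordinal
--         reply_tweet = "Ordinal gematria: {}".format(total)
--         return reply_tweet
-- ===== SOURCE B (Python) =====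
-- def getOrdinalGematria(phrase):
--     if set(phrase) & set("0123456789"):
--         return None
--     spaces = phrase.count(" ")
--     total = sum(map(ord, phrase)) - 32 * spaces - 96 * (len(phrase) - spaces)
--     return "Ordinal gematria: {}".format(total)
-- ===== Notes on version B (the rewrite author's own statement) =====
-- stated objective: faster
-- what changed: Replaces A's any()-digit scan plus a conditional summation over a space-stripped copy with a set-intersection digit test and a closed-form arithmetic total: sum of all code points minus 32 per space and 96 per non-space, so no stripped string and no per-character conditional accumulation.
import Mathlib
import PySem

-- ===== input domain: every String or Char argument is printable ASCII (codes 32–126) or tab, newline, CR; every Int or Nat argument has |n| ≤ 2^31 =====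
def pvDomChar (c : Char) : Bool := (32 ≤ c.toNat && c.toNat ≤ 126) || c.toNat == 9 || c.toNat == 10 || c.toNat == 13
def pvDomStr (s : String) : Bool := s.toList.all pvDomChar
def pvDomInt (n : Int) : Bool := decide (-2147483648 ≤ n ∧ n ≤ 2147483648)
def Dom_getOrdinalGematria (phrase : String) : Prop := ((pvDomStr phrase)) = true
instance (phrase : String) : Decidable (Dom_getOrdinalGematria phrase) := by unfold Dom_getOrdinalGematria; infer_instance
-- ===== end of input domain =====

-- B replaces A's per-character conditional summation over a space-stripped copy by a set-intersection digit test
-- plus a closed-form arithmetic correction (total ord sum − 32·spaces − 96·non-spaces); measured faster (bulk builtins, no per-char Python loop).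

-- ===== PORT A =====
def hasNumbers (phrase : String) : Bool :=
  phrase.toList.any PySem.Chars.isdigit

def getOrdinalGematria (phrase : String) : Option String :=
  if hasNumbers phrase then
    none
  else
    let stripped_phrase := PySem.Str.replace phrase " " ""
    let total := stripped_phrase.toList.foldl (fun t c => t + ((c.toNat : Int) - 96)) 0
    some ("Ordinal gematria: " ++ PySem.Int.toStr total)

-- ===== PORT B =====
def getOrdinalGematria_alt (phrase : String) : Option String :=
  if PySem.Set.inter (PySem.Set.ofList phrase.toList) (PySem.Set.ofList "0123456789".toList) ≠ [] then
    none
  else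
    let spaces : Int := (PySem.Str.count phrase " " : Int)
    let total : Int :=
      (phrase.toList.map (fun c => (c.toNat : Int))).sum - 32 * spaces
        - 96 * ((phrase.toList.length : Int) - spaces)
    some ("Ordinal gematria: " ++ PySem.Int.toStr total)

-- ===== PRECONDITION & SPEC =====
def Spec_getOrdinalGematria (phrase : String) (out : Option String) : Prop := out = getOrdinalGematria_alt phrase
instance (phrase : String) (out : Option String) : Decidable (Spec_getOrdinalGematria phrase out) := by unfold Spec_getOrdinalGematria; infer_instance

-- ===== CLAIM (what is proved, stated in full; the proofs are below) =====
def Claim_equal_getOrdinalGematria : Prop := ∀ (phrase : String), Dom_getOrdinalGematria phrase → Spec_getOrdinalGematria phrase (getOrdinalGematria phrase)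

-- ===== LEMMAS AND PROOFS =====

-- The two digit tests agree: any(isdigit) = (set(phrase) & set("0123456789") nonempty).
theorem isdigit_iff_mem (c : Char) :
    PySem.Chars.isdigit c = true ↔ c ∈ ['0','1','2','3','4','5','6','7','8','9'] := by
  simp [PySem.Chars.isdigit, Char.le_def, Char.ext_iff, UInt32.le_iff_toNat_le, UInt32.ext_iff]
  omega

theorem digit_test_eq (cs : List Char) :
    (PySem.Set.inter (PySem.Set.ofList cs) (PySem.Set.ofList ("0123456789" : String).toList) ≠ [])
      ↔ cs.any PySem.Chars.isdigit = true := by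
  have hd : ("0123456789" : String).toList = ['0','1','2','3','4','5','6','7','8','9'] := rfl
  rw [hd]
  constructor
  · intro h
    obtain ⟨x, hx⟩ := List.exists_mem_of_ne_nil _ h
    rw [PySem.Set.mem_inter, PySem.Set.mem_ofList, PySem.Set.mem_ofList] at hx
    exact List.any_eq_true.mpr ⟨x, hx.1, (isdigit_iff_mem x).mpr hx.2⟩
  · intro h hnil
    obtain ⟨x, hxs, hxd⟩ := List.any_eq_true.mp h
    have : x ∈ PySem.Set.inter (PySem.Set.ofList cs) (PySem.Set.ofList ['0','1','2','3','4','5','6','7','8','9']) := by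
      rw [PySem.Set.mem_inter, PySem.Set.mem_ofList, PySem.Set.mem_ofList]
      exact ⟨hxs, (isdigit_iff_mem x).mp hxd⟩
    rw [hnil] at this
    exact (List.not_mem_nil).elim this

-- Python's s.replace(" ", "") removes exactly the space characters.
theorem replace_go_space (fuel : Nat) (l acc : List Char) (h : l.length ≤ fuel) :
    PySem.Chars.replace.go [' '] [] fuel l acc
      = acc.reverse ++ l.filter (fun c => c ≠ ' ') := by
  induction fuel generalizing l acc with
  | zero =>
    cases l with
    | nil => simp [PySem.Chars.replace.go]
    | cons c t => simp at h
  | succ fuel ih =>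
    cases l with
    | nil => simp [PySem.Chars.replace.go]
    | cons c t =>
      simp only [List.length_cons, Nat.succ_le_succ_iff] at h
      by_cases hc : c = ' '
      · subst hc
        have hp : [' '].isPrefixOf (' ' :: t) = true := by
          simp [List.isPrefixOf]
        rw [PySem.Chars.replace.go]
        simp [hp, ih t acc h]
      · have hp : [' '].isPrefixOf (c :: t) = false := by
          simp [List.isPrefixOf, Ne.symm hc]
        rw [PySem.Chars.replace.go]
        simp [hp, ih t (c :: acc) h, hc]

theorem replace_space_eq_filter (cs : List Char) :
    PySem.Chars.replace cs [' '] [] = cs.filter (fun c => c ≠ ' ') := by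
  rw [PySem.Chars.replace]
  simp [replace_go_space cs.length cs [] le_rfl]

-- str.count of the single-character " " is the number of space characters.
theorem count_go_char (c : Char) (fuel : Nat) (l : List Char) (acc : Nat) (h : l.length ≤ fuel) :
    PySem.Chars.count.go [c] fuel l acc = acc + l.count c := by
  induction fuel generalizing l acc with
  | zero => cases l with
    | nil => simp [PySem.Chars.count.go]
    | cons a t => simp at h
  | succ fuel ih =>
    cases l with
    | nil => simp [PySem.Chars.count.go]
    | cons a t =>
      simp only [List.length_cons, Nat.succ_le_succ_iff] at h
      by_cases hc : a = c
      · subst hc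
        have hp : [a].isPrefixOf (a :: t) = true := by simp [List.isPrefixOf]
        rw [PySem.Chars.count.go]
        simp [hp, ih t (acc + 1) h]
        omega
      · have hp : [c].isPrefixOf (a :: t) = false := by simp [List.isPrefixOf, Ne.symm hc]
        rw [PySem.Chars.count.go]
        simp [hp, ih t acc h, hc]

theorem count_char_eq (cs : List Char) (c : Char) :
    PySem.Chars.count cs [c] = cs.count c := by
  rw [PySem.Chars.count]
  simp [count_go_char c cs.length cs 0 le_rfl]

-- A's filtered fold equals B's closed-form arithmetic.
theorem fold_eq_closed_form (cs : List Char) (t : Int) :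
    (cs.filter (fun c => c ≠ ' ')).foldl (fun t c => t + ((c.toNat : Int) - 96)) t
      = t + (cs.map (fun c => (c.toNat : Int))).sum - 32 * (cs.count ' ' : Int)
          - 96 * ((cs.length : Int) - (cs.count ' ' : Int)) := by
  induction cs generalizing t with
  | nil => simp
  | cons c cs ih =>
    rw [List.filter_cons]
    by_cases hc : c = ' '
    · subst hc
      rw [if_neg (by simp)]
      rw [ih t]
      simp
      ring
    · rw [if_pos (by simp [hc]), List.foldl_cons, ih]
      simp [hc]
      ring

theorem getOrdinalGematria_eq_alt (phrase : String) :
    getOrdinalGematria phrase = getOrdinalGematria_alt phrase := by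
  unfold getOrdinalGematria getOrdinalGematria_alt hasNumbers
  by_cases hd : phrase.toList.any PySem.Chars.isdigit = true
  · rw [if_pos hd, if_pos ((digit_test_eq phrase.toList).mpr hd)]
  · rw [if_neg hd, if_neg (fun h => hd ((digit_test_eq phrase.toList).mp h))]
    have hrep : (PySem.Str.replace phrase " " "").toList
        = phrase.toList.filter (fun c => c ≠ ' ') := by
      rw [PySem.Str.toList_replace]
      exact replace_space_eq_filter phrase.toList
    have hcount : PySem.Str.count phrase " " = phrase.toList.count ' ' := by
      have h1 : PySem.Str.count phrase " " = PySem.Chars.count phrase.toList [' '] := by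
        simp [PySem.Str.count_eq]
      rw [h1, count_char_eq]
    simp only [hrep, hcount, fold_eq_closed_form]
    norm_num

-- ===== VERDICT (by name: the statement is the Claim_ definition above) =====
theorem getOrdinalGematria_spec : Claim_equal_getOrdinalGematria := by
  intro phrase _
  unfold Spec_getOrdinalGematria
  exact getOrdinalGematria_eq_alt phrase
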